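-- pv_equiv track=rewrite | github.com/ChaseKolozsy/auto-debugger | autodebugger/function_blocks.py | parse_function_blocks
-- ===== SOURCE A (Python) =====
-- from typing import List, Tuple, Optional, Dict, Any
--
-- def parse_function_blocks(function_body: str) -> List[str]:
--     """
--     Parse a function body into blocks separated by blank lines.
--
--     A block is a continuous section of code without blank lines.
--
--     Args:
--         function_body: The function body text
--
--     Returns:
--         List of code blocks (non-empty sections)
--     """
--     if not function_body:
--         return []
--
--     lines = function_body.split('\n')
--     blocks = []
--     current_block = []
--
--     for line in lines:
--         # Check if line is blank (only whitespace)
--         if line.strip():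
--             # Non-blank line, add to current block
--             current_block.append(line)
--         else:
--             # Blank line - end current block if it has content
--             if current_block:
--                 blocks.append('\n'.join(current_block))
--                 current_block = []
--
--     # Don't forget the last block if it exists
--     if current_block:
--         blocks.append('\n'.join(current_block))
--
--     return blocks
-- ===== SOURCE B (Python) =====
-- from typing import List
--
--
-- def parse_function_blocks(function_body: str) -> List[str]:
--     """Two-pointer run extraction: slice out each maximal run of non-blank
--     lines directly, instead of an accumulator with an end-of-loop flush."""
--     lines = function_body.split('\n')
--     blocks = []
--     while lines:
--         if not lines[0].strip():
--             lines = lines[1:]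
--         else:
--             k = 0
--             while k < len(lines) and lines[k].strip():
--                 k += 1
--             blocks.append('\n'.join(lines[:k]))
--             lines = lines[k:]
--     return blocks
-- ===== Notes on version B (the rewrite author's own statement) =====
-- stated objective: simpler
-- what changed: Replaces A's accumulator-and-end-of-loop-flush fold over lines with a two-pointer scan that slices out each maximal run of non-blank lines directly (no pending current_block state, no flush, no empty-string guard).
import Mathlib
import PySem

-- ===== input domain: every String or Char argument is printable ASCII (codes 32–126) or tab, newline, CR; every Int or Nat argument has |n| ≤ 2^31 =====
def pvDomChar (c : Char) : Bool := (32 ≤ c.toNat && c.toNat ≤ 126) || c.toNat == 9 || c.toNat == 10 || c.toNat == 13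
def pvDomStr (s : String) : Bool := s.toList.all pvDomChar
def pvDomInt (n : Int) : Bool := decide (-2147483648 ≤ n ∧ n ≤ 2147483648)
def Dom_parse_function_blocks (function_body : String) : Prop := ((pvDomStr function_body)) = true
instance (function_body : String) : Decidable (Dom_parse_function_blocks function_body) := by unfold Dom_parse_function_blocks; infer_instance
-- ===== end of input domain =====

-- B replaces A's accumulator-and-flush loop by two-pointer extraction of each maximal non-blank run (objective: simpler).

-- ===== PORT A =====
-- A: fold over the lines with state (blocks, current_block), flushing on blank lines and once at the end.
def pfbA_step (st : List String × List String) (line : String) : List String × List String :=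
  if PySem.Str.strip line ≠ "" then (st.1, st.2 ++ [line])
  else if st.2 ≠ [] then (st.1 ++ [PySem.Str.join "\n" st.2], [])
  else st

def parse_function_blocks (function_body : String) : List String :=
  if function_body = "" then []
  else
    let lines := (PySem.Str.split? function_body "\n").getD []
    let st : List String × List String := lines.foldl pfbA_step ([], [])
    if st.2 ≠ [] then st.1 ++ [PySem.Str.join "\n" st.2] else st.1

-- ===== PORT B =====
-- inner while loop of B: length of the leading run of non-blank lines
def pfbB_runLen : List String → Nat
  | [] => 0
  | l :: rest => if PySem.Str.strip l = "" then 0 else pfbB_runLen rest + 1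

-- outer while loop of B: skip a blank line, or slice off a whole non-blank run
def pfbB_go : List String → List String
  | [] => []
  | l :: rest =>
    if h : PySem.Str.strip l = "" then pfbB_go rest
    else
      let k := pfbB_runLen (l :: rest)
      PySem.Str.join "\n" ((l :: rest).take k) :: pfbB_go ((l :: rest).drop k)
termination_by lines => lines.length
decreasing_by
  · simp
  · have hk : pfbB_runLen (l :: rest) = pfbB_runLen rest + 1 := by simp [pfbB_runLen, h]
    simp [hk]

def parse_function_blocks_alt (function_body : String) : List String :=
  pfbB_go ((PySem.Str.split? function_body "\n").getD [])

-- ===== PRECONDITION & SPEC =====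
def Spec_parse_function_blocks (function_body : String) (out : List String) : Prop := out = parse_function_blocks_alt function_body
instance (function_body : String) (out : List String) : Decidable (Spec_parse_function_blocks function_body out) := by unfold Spec_parse_function_blocks; infer_instance

-- ===== CLAIM (what is proved, stated in full; the proofs are below) =====
def Claim_equal_parse_function_blocks : Prop := ∀ (function_body : String), Dom_parse_function_blocks function_body → Spec_parse_function_blocks function_body (parse_function_blocks function_body)

-- ===== LEMMAS AND PROOFS =====

theorem pfbB_runLen_append (xs ys : List String) (hxs : ∀ x ∈ xs, PySem.Str.strip x ≠ "") :
    pfbB_runLen (xs ++ ys) = xs.length + pfbB_runLen ys := by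
  induction xs with
  | nil => simp [pfbB_runLen]
  | cons a as ih =>
    have ha := hxs a (by simp)
    simp [pfbB_runLen, ha, ih (fun x hx => hxs x (by simp [hx]))]
    omega

theorem pfbB_go_all_nonblank (xs : List String) (hxs : ∀ x ∈ xs, PySem.Str.strip x ≠ "") (hne : xs ≠ []) :
    pfbB_go xs = [PySem.Str.join "\n" xs] := by
  match xs with
  | [] => exact absurd rfl hne
  | l :: rest =>
    have hl := hxs l (by simp)
    have hk : pfbB_runLen (l :: rest) = (l :: rest).length := by
      have := pfbB_runLen_append (l :: rest) [] hxs
      simpa [pfbB_runLen] using this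
    rw [pfbB_go]
    simp [hl, hk, pfbB_go]

theorem pfbA_invariant (lines : List String) (blocks cur : List String)
    (hcur : ∀ x ∈ cur, PySem.Str.strip x ≠ "") :
    (let st := lines.foldl pfbA_step (blocks, cur)
     if st.2 ≠ [] then st.1 ++ [PySem.Str.join "\n" st.2] else st.1)
    = blocks ++ pfbB_go (cur ++ lines) := by
  induction lines generalizing blocks cur with
  | nil =>
    by_cases hc : cur = []
    · simp [hc, pfbB_go]
    · simp only [List.foldl_nil, List.append_nil]
      rw [pfbB_go_all_nonblank cur hcur hc]
      simp [hc]
  | cons l rest ih =>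
    by_cases hl : PySem.Str.strip l = ""
    · by_cases hc : cur = []
      · -- blank line, empty current block: state unchanged
        have : pfbA_step (blocks, cur) l = (blocks, cur) := by
          simp [pfbA_step, hl, hc]
        rw [List.foldl_cons, this, ih blocks cur hcur, hc]
        simp [pfbB_go, hl]
      · -- blank line, flush current block
        have hstep : pfbA_step (blocks, cur) l = (blocks ++ [PySem.Str.join "\n" cur], []) := by
          simp [pfbA_step, hl, hc]
        rw [List.foldl_cons, hstep, ih _ _ (by simp)]
        -- RHS: cur ++ l :: rest starts with the non-blank run cur
        match cur, hc with
        | c :: cs, _ =>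
          have hk : pfbB_runLen ((c :: cs) ++ l :: rest) = (c :: cs).length := by
            rw [pfbB_runLen_append (c :: cs) (l :: rest) hcur]
            simp [pfbB_runLen, hl]
          have hc0 := hcur c (by simp)
          have : pfbB_go ((c :: cs) ++ l :: rest)
              = PySem.Str.join "\n" (c :: cs) :: pfbB_go (l :: rest) := by
            rw [show (c :: cs) ++ l :: rest = c :: (cs ++ l :: rest) by simp,
                pfbB_go]
            simp only [hc0, dite_false]
            rw [show c :: (cs ++ l :: rest) = (c :: cs) ++ (l :: rest) by simp, hk]
            rw [List.take_left, List.drop_left]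
          rw [this]
          simp [pfbB_go, hl]
    · -- non-blank line: append to current block
      have hstep : pfbA_step (blocks, cur) l = (blocks, cur ++ [l]) := by
        simp [pfbA_step, hl]
      rw [List.foldl_cons, hstep,
          ih blocks (cur ++ [l]) (by intro x hx; rcases List.mem_append.1 hx with h | h
                                     · exact hcur x h
                                     · simp at h; simpa [h] using hl)]
      simp

theorem pfbB_go_splitOn_empty : pfbB_go ((PySem.Str.split? "" "\n").getD []) = [] := by
  have h : (PySem.Str.split? "" "\n").getD [] = [""] := by decide
  have h2 : PySem.Str.strip "" = "" := by decide
  rw [h, pfbB_go]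
  simp [h2, pfbB_go]

-- ===== VERDICT (by name: the statement is the Claim_ definition above) =====
theorem parse_function_blocks_spec : Claim_equal_parse_function_blocks := by
  intro s _
  unfold Spec_parse_function_blocks parse_function_blocks parse_function_blocks_alt
  by_cases hs : s = ""
  · simp [hs, pfbB_go_splitOn_empty]
  · simp only [hs, if_false]
    have := pfbA_invariant ((PySem.Str.split? s "\n").getD []) [] [] (by simp)
    simpa using this
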